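-- pv_equiv track=rewrite | github.com/code-study-classes/python-basics-f0nt0m | practice_package/loops.py | count_vowel_triplets
-- ===== SOURCE A (Python) =====
-- def count_vowel_triplets(text: str) -> int:
--     vowels = set("aeiouy")
--     t = text.lower()
--
--     def is_vowel(i: int) -> bool:
--         ch = t[i]
--         if ch not in vowels:
--             return False
--         if ch == "u" and i > 0 and t[i - 1] == "q":
--             return False
--         return True
--
--     count = 0
--     for i in range(len(t) - 2):
--         if is_vowel(i) and is_vowel(i + 1) and is_vowel(i + 2):
--             count += 1
--
--     letters = [ch for ch in t if ch.isalpha()]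
--     if letters and all(ch in vowels for ch in letters) and count > 1:
--         return 1
--     return count
-- ===== SOURCE B (Python) =====
-- def count_vowel_triplets(text: str) -> int:
--     # One left-to-right pass tracking the current consecutive-vowel run length
--     # instead of A's per-index triple window check.
--     vowels = set("aeiouy")
--     t = text.lower()
--     count = 0
--     run = 0
--     prev = " "
--     for ch in t:
--         if ch in vowels and not (ch == "u" and prev == "q"):
--             run += 1
--         else:
--             run = 0
--         if run >= 3:
--             count += 1
--         prev = ch
--     letters = [ch for ch in t if ch.isalpha()]
--     if letters and all(ch in vowels for ch in letters) and count > 1: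
--         return 1
--     return count
-- ===== Notes on version B (the rewrite author's own statement) =====
-- stated objective: alternative
-- what changed: Replaces A's per-index triple window check (three is_vowel calls per index) with a single left-to-right pass tracking the current consecutive-vowel run length, counting positions where the run reaches 3; one vowel test per character instead of three.
import Mathlib
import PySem

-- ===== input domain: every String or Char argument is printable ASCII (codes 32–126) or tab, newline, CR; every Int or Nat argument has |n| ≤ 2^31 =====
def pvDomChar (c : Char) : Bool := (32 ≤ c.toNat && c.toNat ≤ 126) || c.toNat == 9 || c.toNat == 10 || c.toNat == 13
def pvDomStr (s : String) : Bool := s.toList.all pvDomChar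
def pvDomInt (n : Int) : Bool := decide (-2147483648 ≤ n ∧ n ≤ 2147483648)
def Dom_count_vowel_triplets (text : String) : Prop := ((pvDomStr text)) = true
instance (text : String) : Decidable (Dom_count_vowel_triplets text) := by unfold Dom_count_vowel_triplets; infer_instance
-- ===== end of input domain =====

-- B replaces A's per-index triple-window check by a single pass tracking the current
-- consecutive-vowel run length (one vowel test per character instead of three).

-- ===== PORT A =====
def cvtVowels : List Char := ['a', 'e', 'i', 'o', 'u', 'y']

-- A's inner is_vowel(i): t[i] must be a vowel, and a 'u' right after a 'q' does not count
def cvtIsVowelA (t : List Char) (i : Int) : Bool :=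
  match PySem.List.pyGet? t i with
  | none => false
  | some ch =>
    if !(cvtVowels.contains ch) then false
    else if ch == 'u' && decide (0 < i) && (PySem.List.pyGet? t (i - 1) == some 'q') then false
    else true

-- the body of A's "for i in range(len(t) - 2)" loop
def cvtStepA (t : List Char) (c : Int) (i : Int) : Int :=
  if cvtIsVowelA t i && cvtIsVowelA t (i + 1) && cvtIsVowelA t (i + 2) then c + 1 else c

def count_vowel_triplets (text : String) : Int :=
  let t := (PySem.Str.lower text).toList
  let count := (PySem.List.pyRange 0 ((t.length : Int) - 2) 1).foldl (cvtStepA t) 0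
  let letters := t.filter PySem.Chars.isalpha
  if !letters.isEmpty && letters.all (fun ch => cvtVowels.contains ch) && decide (1 < count)
  then 1 else count

-- ===== PORT B =====
-- B's loop body: state is (count, run, prev)
def cvtStepB (s : Int × Int × Char) (ch : Char) : Int × Int × Char :=
  let run' : Int := if cvtVowels.contains ch && !(ch == 'u' && s.2.2 == 'q') then s.2.1 + 1 else 0
  ((if 3 ≤ run' then s.1 + 1 else s.1), run', ch)

def count_vowel_triplets_alt (text : String) : Int :=
  let t := (PySem.Str.lower text).toList
  let count := (t.foldl cvtStepB (0, 0, ' ')).1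
  let letters := t.filter PySem.Chars.isalpha
  if !letters.isEmpty && letters.all (fun ch => cvtVowels.contains ch) && decide (1 < count)
  then 1 else count

-- ===== PRECONDITION & SPEC =====
def Spec_count_vowel_triplets (text : String) (out : Int) : Prop := out = count_vowel_triplets_alt text
instance (text : String) (out : Int) : Decidable (Spec_count_vowel_triplets text out) := by unfold Spec_count_vowel_triplets; infer_instance

-- ===== CLAIM (what is proved, stated in full; the proofs are below) =====
def Claim_equal_count_vowel_triplets : Prop := ∀ (text : String), Dom_count_vowel_triplets text → Spec_count_vowel_triplets text (count_vowel_triplets text)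

-- ===== LEMMAS AND PROOFS =====

-- vowel test of char c when the preceding char is p
def vw (p c : Char) : Bool := cvtVowels.contains c && !(c == 'u' && p == 'q')
def win : List Bool → Int
  | a :: b :: c :: r => (if a && b && c then 1 else 0) + win (b :: c :: r)
  | _ => 0
def Wc (run : Int) : List Bool → Int
  | [] => 0
  | a :: r => (if 3 ≤ (if a then run + 1 else 0) then 1 else 0) + Wc (if a then run + 1 else 0) r
def Ec (run : Int) : List Bool → Int
  | [] => 0
  | [a] => if 2 ≤ run ∧ a then 1 else 0
  | a :: b :: _ => (if 2 ≤ run ∧ a then 1 else 0) + (if 1 ≤ run ∧ a ∧ b then 1 else 0)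
theorem win_short (bs : List Bool) (h : bs.length < 3) : win bs = 0 := by
  match bs with
  | [] => rfl
  | [_] => rfl
  | [_, _] => rfl
  | _ :: _ :: _ :: _ => simp at h; omega
theorem Wc_eq (l : List Bool) : ∀ run : Int, 0 ≤ run → Wc run l = win l + Ec run l := by
  induction l with
  | nil => intro run _; rfl
  | cons a r ih =>
    intro run hrun
    match r with
    | [] => cases a <;> simp [Wc, win, Ec] <;> split_ifs <;> omega
    | [b] =>
      cases a <;> cases b <;> simp [Wc, win, Ec] <;> split_ifs <;> omega
    | b :: c :: r' =>
      have h := ih (if a then run + 1 else 0) (by split_ifs <;> omega)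
      rw [show Wc run (a :: b :: c :: r') =
        (if 3 ≤ (if a then run + 1 else 0) then 1 else 0) + Wc (if a then run + 1 else 0) (b :: c :: r') from rfl,
        h, show win (a :: b :: c :: r') = (if a && b && c then 1 else 0) + win (b :: c :: r') from rfl]
      cases a <;> cases b <;> cases c <;> simp [Ec] <;> split_ifs <;> omega
def bools (p : Char) : List Char → List Bool
  | [] => []
  | a :: r => vw p a :: bools a r
theorem foldB (l : List Char) : ∀ (count run : Int) (prev : Char),
    (l.foldl cvtStepB (count, run, prev)).1 = count + Wc run (bools prev l) := by
  induction l with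
  | nil => intro c r p; simp [Wc, bools]
  | cons a t ih =>
    intro c r p
    rw [List.foldl_cons, show cvtStepB (c, r, p) a =
      ((if 3 ≤ (if vw p a then r + 1 else 0) then c + 1 else c),
        (if vw p a then r + 1 else 0), a) from rfl,
      ih, show bools p (a :: t) = vw p a :: bools a t from rfl,
      show Wc r (vw p a :: bools a t) =
        (if 3 ≤ (if vw p a then r + 1 else 0) then 1 else 0) + Wc (if vw p a then r + 1 else 0) (bools a t) from rfl]
    split_ifs <;> omega
theorem bools_getD (l : List Char) : ∀ (p : Char) (i : Nat),
    (bools p l).getD i false =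
      match l[i]? with
      | none => false
      | some c => vw (if i = 0 then p else l.getD (i - 1) ' ') c := by
  induction l with
  | nil => intro p i; simp [bools]
  | cons a t ih =>
    intro p i
    match i with
    | 0 => simp [bools]
    | 1 =>
      rw [show bools p (a :: t) = vw p a :: bools a t from rfl]
      simpa using ih a 0
    | (j + 2) =>
      rw [show bools p (a :: t) = vw p a :: bools a t from rfl]
      simpa using ih a (j + 1)
theorem char_beq_decide (a b : Char) : (a == b) = decide (a = b) := by
  by_cases h : a = b <;> simp [h]
theorem isVowelA_eq (t : List Char) (i : Nat) :
    cvtIsVowelA t (i : Int) = (bools ' ' t).getD i false := by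
  rw [bools_getD]
  unfold cvtIsVowelA
  rw [PySem.List.pyGet?_natCast]
  match h : t[i]? with
  | none => simp
  | some c =>
    simp only
    match i with
    | 0 => simp [vw]
    | (j + 1) =>
      have hlen : j + 1 < t.length := by
        by_contra hc
        rw [List.getElem?_eq_none (by omega)] at h
        simp at h
      have hprev : PySem.List.pyGet? t (((j + 1 : Nat) : Int) - 1) = some (t.getD j ' ') := by
        rw [show ((j + 1 : Nat) : Int) - 1 = ((j : Nat) : Int) by push_cast; ring,
          PySem.List.pyGet?_natCast, List.getD_eq_getElem?_getD,
          List.getElem?_eq_getElem (by omega)]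
        simp
      rw [hprev]
      simp only [vw, show (j + 1 : Nat) ≠ 0 from by omega, if_neg, Nat.add_sub_cancel]
      by_cases hv : cvtVowels.contains c
      · by_cases hu : c = 'u'
        · by_cases hq : t.getD j ' ' = 'q' <;> simp [hu, hq, List.getD_eq_getElem?_getD, char_beq_decide]
        · simp [hu, List.getD_eq_getElem?_getD, char_beq_decide]
      · simp [List.getD_eq_getElem?_getD, char_beq_decide]
theorem length_bools (p : Char) (l : List Char) : (bools p l).length = l.length := by
  induction l generalizing p with
  | nil => rfl
  | cons a r ih => simp [bools, ih]
theorem foldl_count_init (p : Nat → Bool) (ks : List Nat) : ∀ c : Int,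
    ks.foldl (fun c k => if p k then c + 1 else c) c =
      c + ks.foldl (fun c k => if p k then c + 1 else c) 0 := by
  induction ks with
  | nil => intro c; simp
  | cons k ks ih =>
    intro c
    rw [List.foldl_cons, List.foldl_cons, ih, ih (if p k then 0 + 1 else 0)]
    split_ifs <;> omega
theorem foldl_range_shift (p : Nat → Bool) (m : Nat) (c : Int) :
    (List.range (m + 1)).foldl (fun c k => if p k then c + 1 else c) c
    = (List.range m).foldl (fun c k => if p (k + 1) then c + 1 else c) (if p 0 then c + 1 else c) := by
  rw [List.range_succ_eq_map, List.foldl_cons, List.foldl_map]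
theorem foldWin (bs : List Bool) :
    (List.range (bs.length - 2)).foldl
      (fun c k => if bs.getD k false && bs.getD (k + 1) false && bs.getD (k + 2) false then c + 1 else c)
      (0 : Int) = win bs := by
  induction bs with
  | nil => rfl
  | cons a r ih =>
    match hr : r with
    | [] => rfl
    | [_] => rfl
    | b :: c :: r' =>
      have hlen : (a :: b :: c :: r').length - 2 = ((b :: c :: r').length - 2) + 1 := by
        simp
      rw [hlen, foldl_range_shift]
      have hshift : (List.range ((b :: c :: r').length - 2)).foldl
          (fun cc k => if (a :: b :: c :: r').getD (k + 1) false && (a :: b :: c :: r').getD (k + 1 + 1) false &&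
              (a :: b :: c :: r').getD (k + 1 + 2) false then cc + 1 else cc)
          (if (a :: b :: c :: r').getD 0 false && (a :: b :: c :: r').getD (0 + 1) false &&
              (a :: b :: c :: r').getD (0 + 2) false then (0 : Int) + 1 else 0)
        = (List.range ((b :: c :: r').length - 2)).foldl
          (fun cc k => if (b :: c :: r').getD k false && (b :: c :: r').getD (k + 1) false &&
              (b :: c :: r').getD (k + 2) false then cc + 1 else cc)
          (if a && b && c then (0 : Int) + 1 else 0) := rfl
      rw [hshift, foldl_count_init (fun k => (b :: c :: r').getD k false && (b :: c :: r').getD (k + 1) false &&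
          (b :: c :: r').getD (k + 2) false), ih]
      rw [show win (a :: b :: c :: r') = (if a && b && c then 1 else 0) + win (b :: c :: r') from rfl]
      split_ifs <;> omega
theorem foldA (t : List Char) :
    (PySem.List.pyRange 0 ((t.length : Int) - 2) 1).foldl (cvtStepA t) 0 = win (bools ' ' t) := by
  rw [PySem.List.pyRange_one]
  by_cases h : t.length < 3
  · rw [show ((t.length : Int) - 2 - 0).toNat = 0 by omega]
    rw [win_short _ (by rw [length_bools]; omega)]
    rfl
  · rw [show ((t.length : Int) - 2 - 0).toNat = t.length - 2 by omega, List.foldl_map]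
    have hstep : (fun (c : Int) (k : Nat) => cvtStepA t c (0 + (k : Int)))
        = (fun (c : Int) (k : Nat) => if (bools ' ' t).getD k false && (bools ' ' t).getD (k + 1) false &&
            (bools ' ' t).getD (k + 2) false then c + 1 else c) := by
      funext c k
      simp only [cvtStepA, zero_add]
      rw [show (k : Int) + 1 = ((k + 1 : Nat) : Int) by push_cast; ring,
        show (k : Int) + 2 = ((k + 2 : Nat) : Int) by push_cast; ring,
        isVowelA_eq, isVowelA_eq, isVowelA_eq]
    rw [hstep]
    have := foldWin (bools ' ' t)
    rw [length_bools] at this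
    exact this

theorem Ec_zero (l : List Bool) : Ec 0 l = 0 := by
  match l with
  | [] => rfl
  | [a] => simp [Ec]
  | a :: b :: r => simp [Ec]

-- ===== VERDICT (by name: the statement is the Claim_ definition above) =====
theorem count_vowel_triplets_spec : Claim_equal_count_vowel_triplets := by
  intro text _
  unfold Spec_count_vowel_triplets count_vowel_triplets count_vowel_triplets_alt
  simp only
  rw [foldA, foldB, Wc_eq _ 0 le_rfl, Ec_zero]
  norm_num
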